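-- pv_equiv track=rewrite | github.com/TheCodeN00b/ComputerVisionProject | sort/FunctionExtractions.py | __symbols_are_close_in_equation
-- ===== SOURCE A (Python) =====
-- def __symbols_are_close_in_equation(symbol_1_indices, symbol_2_indices):
--     """
--     The function verify if almost two indices in the input lists are
--     close.
--     :param symbol_1_indices: the list of indices of the first symbol
--     :param symbol_2_indices: the list of indices of the second symbol
--     :return: a tuple (x, y) where x is the index of the left-most symbol and y the index
--     of the right-most symbol. If no exists such symbols returns (-1, -1)
--     """
--
--     for index_1 in symbol_1_indices:
--         for index_2 in symbol_2_indices: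
--             if index_1 == index_2 + 1:
--                 return index_2, index_1
--             elif index_2 == index_1 + 1:
--                 return index_1, index_2
--     return -1, -1
-- ===== SOURCE B (Python) =====
-- def __symbols_are_close_in_equation(symbol_1_indices, symbol_2_indices):
--     # Hash the first-occurrence position of each value of symbol_2_indices once,
--     # then per index_1 look up index_1-1 and index_1+1 and pick the one seen
--     # earlier in symbol_2_indices.  O(n+m) instead of A's O(n*m).
--     pos = {}
--     for p, v in enumerate(symbol_2_indices):
--         pos.setdefault(v, p)
--     for i in symbol_1_indices:
--         pl = pos.get(i - 1)
--         pr = pos.get(i + 1)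
--         if pl is not None:
--             if pr is None or pl < pr:
--                 return i - 1, i
--             return i, i + 1
--         if pr is not None:
--             return i, i + 1
--     return -1, -1
-- ===== Notes on version B (the rewrite author's own statement) =====
-- stated objective: faster
-- what changed: Replaces the nested scan with a dict of first-occurrence positions of symbol_2 values built once; each index_1 then does two O(1) lookups (index_1-1 and index_1+1) and picks the value occurring earlier in symbol_2_indices, reproducing A's inner-loop tie-breaking.
import Mathlib
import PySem

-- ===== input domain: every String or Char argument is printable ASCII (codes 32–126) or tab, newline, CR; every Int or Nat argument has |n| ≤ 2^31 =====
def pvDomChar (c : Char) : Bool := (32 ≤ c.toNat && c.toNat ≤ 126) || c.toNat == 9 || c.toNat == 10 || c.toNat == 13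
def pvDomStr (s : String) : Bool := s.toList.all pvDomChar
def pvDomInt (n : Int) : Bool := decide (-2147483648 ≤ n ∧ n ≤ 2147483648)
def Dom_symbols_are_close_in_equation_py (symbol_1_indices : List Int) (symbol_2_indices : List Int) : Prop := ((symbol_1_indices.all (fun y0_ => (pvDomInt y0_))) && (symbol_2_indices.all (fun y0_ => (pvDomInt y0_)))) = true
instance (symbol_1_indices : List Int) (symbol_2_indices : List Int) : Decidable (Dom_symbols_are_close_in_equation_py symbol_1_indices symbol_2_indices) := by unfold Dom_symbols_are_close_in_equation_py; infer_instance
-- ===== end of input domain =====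

-- B builds a dict of first-occurrence positions of symbol_2 values once and does two O(1)
-- lookups per index_1 instead of A's inner scan (objective: faster, O(n+m) vs O(n*m)).

-- ===== PORT A =====
-- inner 'for index_2 in symbol_2_indices' loop of A (returns some result or falls through)
def pvInnerA (index_1 : Int) : List Int → Option (List Int)
  | [] => none
  | index_2 :: rest =>
    if index_1 = index_2 + 1 then some [index_2, index_1]
    else if index_2 = index_1 + 1 then some [index_1, index_2]
    else pvInnerA index_1 rest

-- outer 'for index_1 in symbol_1_indices' loop of A
def pvOuterA (symbol_2_indices : List Int) : List Int → List Int
  | [] => [-1, -1]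
  | index_1 :: rest =>
    match pvInnerA index_1 symbol_2_indices with
    | some r => r
    | none => pvOuterA symbol_2_indices rest

def symbols_are_close_in_equation_py (symbol_1_indices : List Int) (symbol_2_indices : List Int) : List Int :=
  pvOuterA symbol_2_indices symbol_1_indices

-- ===== PORT B =====
-- 'pos = {}; for p, v in enumerate(symbol_2_indices): pos.setdefault(v, p)'
def pvPosDict (l : List Int) : PySem.Dict Int Int :=
  (PySem.List.enumerate l).foldl (fun d pv => d.setdefault pv.2 pv.1) PySem.Dict.empty

-- 'for i in symbol_1_indices: pl = pos.get(i-1); pr = pos.get(i+1); …'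
def pvLoopB (pos : PySem.Dict Int Int) : List Int → List Int
  | [] => [-1, -1]
  | i :: rest =>
    match pos.get? (i - 1), pos.get? (i + 1) with
    | some pl, some pr => if pl < pr then [i - 1, i] else [i, i + 1]
    | some _, none => [i - 1, i]
    | none, some _ => [i, i + 1]
    | none, none => pvLoopB pos rest

def symbols_are_close_in_equation_py_alt (symbol_1_indices : List Int) (symbol_2_indices : List Int) : List Int :=
  pvLoopB (pvPosDict symbol_2_indices) symbol_1_indices

-- ===== PRECONDITION & SPEC =====
def Spec_symbols_are_close_in_equation_py (symbol_1_indices : List Int) (symbol_2_indices : List Int) (out : List Int) : Prop := out = symbols_are_close_in_equation_py_alt symbol_1_indices symbol_2_indices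
instance (symbol_1_indices : List Int) (symbol_2_indices : List Int) (out : List Int) : Decidable (Spec_symbols_are_close_in_equation_py symbol_1_indices symbol_2_indices out) := by unfold Spec_symbols_are_close_in_equation_py; infer_instance

-- ===== CLAIM (what is proved, stated in full; the proofs are below) =====
def Claim_equal_symbols_are_close_in_equation_py : Prop := ∀ (symbol_1_indices : List Int) (symbol_2_indices : List Int), Dom_symbols_are_close_in_equation_py symbol_1_indices symbol_2_indices → Spec_symbols_are_close_in_equation_py symbol_1_indices symbol_2_indices (symbols_are_close_in_equation_py symbol_1_indices symbol_2_indices)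

-- ===== LEMMAS AND PROOFS =====

-- first-occurrence index of v in l, as an Int option (spec of both the dict and A's inner scan)
def pvIdxI (l : List Int) (v : Int) : Option Int :=
  (PySem.List.index? l v).map (fun k => (k : Int))

theorem pvIdxI_nil (v : Int) : pvIdxI [] v = none := rfl

theorem pvIdxI_cons_self (x : Int) (xs : List Int) : pvIdxI (x :: xs) x = some 0 := by
  unfold pvIdxI
  rw [PySem.List.index?_cons_self]
  rfl

theorem pvIdxI_cons_of_ne {x v : Int} (h : x ≠ v) (xs : List Int) :
    pvIdxI (x :: xs) v = (pvIdxI xs v).map (· + 1) := by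
  unfold pvIdxI
  rw [PySem.List.index?_cons_of_ne xs h]
  cases PySem.List.index? xs v with
  | none => rfl
  | some k =>
    simp

theorem pvIdxI_nonneg {l : List Int} {v a : Int} (h : pvIdxI l v = some a) : 0 ≤ a := by
  unfold pvIdxI at h
  cases hk : PySem.List.index? l v with
  | none => rw [hk] at h; simp at h
  | some k => rw [hk] at h; simp at h; omega

-- the dict built by B's first loop computes pvIdxI (generalized over accumulator and start)
theorem pvPosDict_fold (l : List Int) :
    ∀ (d : PySem.Dict Int Int) (s : Int) (v : Int),
      ((PySem.List.enumerate l s).foldl (fun d pv => d.setdefault pv.2 pv.1) d).get? v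
        = ((d.get? v).or ((pvIdxI l v).map (fun k => s + k))) := by
  induction l with
  | nil => intro d s v; simp [PySem.List.enumerate, pvIdxI_nil]
  | cons x xs ih =>
    intro d s v
    rw [PySem.List.enumerate_cons]
    simp only [List.foldl_cons]
    rw [ih]
    by_cases hxv : x = v
    · subst hxv
      rw [PySem.Dict.get?_setdefault_self, pvIdxI_cons_self]
      cases d.get? x with
      | some w => rfl
      | none => simp
    · rw [PySem.Dict.get?_setdefault_of_ne d s (Ne.symm hxv), pvIdxI_cons_of_ne hxv]
      cases d.get? v with
      | some w => rfl
      | none =>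
        cases pvIdxI xs v with
        | none => rfl
        | some k =>
          simp only [Option.map_some, Option.none_or]
          congr 1
          ring

theorem pvPosDict_get? (l : List Int) (v : Int) :
    (pvPosDict l).get? v = pvIdxI l v := by
  unfold pvPosDict
  rw [pvPosDict_fold l PySem.Dict.empty 0 v]
  cases h : pvIdxI l v <;> simp [PySem.Dict.get?_empty]

-- the branch structure shared by pvLoopB's body, as a function of the two lookups
def pvChoose (i : Int) : Option Int → Option Int → Option (List Int)
  | some a, some b => some (if a < b then [i - 1, i] else [i, i + 1])
  | some _, none => some [i - 1, i]
  | none, some _ => some [i, i + 1]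
  | none, none => none

-- A's inner scan equals the choice between the two first-occurrence indices
theorem pvInnerA_eq_choose (i : Int) (l : List Int) :
    pvInnerA i l = pvChoose i (pvIdxI l (i - 1)) (pvIdxI l (i + 1)) := by
  induction l with
  | nil => rfl
  | cons x xs ih =>
    by_cases h1 : i = x + 1
    · have hx : x = i - 1 := by omega
      subst hx
      have hA : pvInnerA i ((i - 1) :: xs) = some [i - 1, i] := by
        unfold pvInnerA
        rw [if_pos (by omega)]
      rw [hA, pvIdxI_cons_self, pvIdxI_cons_of_ne (show (i - 1 : Int) ≠ i + 1 by omega)]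
      cases hr : pvIdxI xs (i + 1) with
      | none => rfl
      | some b =>
        have hb := pvIdxI_nonneg hr
        simp only [Option.map_some, pvChoose]
        rw [if_pos (by omega)]
    · by_cases h2 : x = i + 1
      · subst h2
        have hA : pvInnerA i ((i + 1) :: xs) = some [i, i + 1] := by
          unfold pvInnerA
          rw [if_neg (by omega), if_pos rfl]
        rw [hA, pvIdxI_cons_self, pvIdxI_cons_of_ne (show (i + 1 : Int) ≠ i - 1 by omega)]
        cases hl : pvIdxI xs (i - 1) with
        | none => rfl
        | some a =>
          have ha := pvIdxI_nonneg hl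
          simp only [Option.map_some, pvChoose]
          rw [if_neg (by omega)]
      · have hA : pvInnerA i (x :: xs) = pvInnerA i xs := by
          conv_lhs => unfold pvInnerA
          rw [if_neg h1, if_neg h2]
        rw [hA, ih, pvIdxI_cons_of_ne (show x ≠ i - 1 by omega),
            pvIdxI_cons_of_ne (show x ≠ i + 1 by omega)]
        cases pvIdxI xs (i - 1) with
        | none =>
          cases pvIdxI xs (i + 1) with
          | none => rfl
          | some b => rfl
        | some a =>
          cases pvIdxI xs (i + 1) with
          | none => rfl
          | some b =>
            simp only [Option.map_some, pvChoose]
            by_cases hab : a < b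
            · rw [if_pos hab, if_pos (by omega)]
            · rw [if_neg hab, if_neg (by omega)]

theorem pvLoopB_eq_outerA (s2 : List Int) (s1 : List Int) :
    pvOuterA s2 s1 = pvLoopB (pvPosDict s2) s1 := by
  induction s1 with
  | nil => rfl
  | cons i rest ih =>
    show (match pvInnerA i s2 with
          | some r => r
          | none => pvOuterA s2 rest) = _
    rw [pvInnerA_eq_choose]
    show _ = (match (pvPosDict s2).get? (i - 1), (pvPosDict s2).get? (i + 1) with
          | some pl, some pr => if pl < pr then [i - 1, i] else [i, i + 1]
          | some _, none => [i - 1, i]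
          | none, some _ => [i, i + 1]
          | none, none => pvLoopB (pvPosDict s2) rest)
    rw [pvPosDict_get?, pvPosDict_get?]
    cases pvIdxI s2 (i - 1) with
    | none =>
      cases pvIdxI s2 (i + 1) with
      | none => exact ih
      | some b => rfl
    | some a =>
      cases pvIdxI s2 (i + 1) with
      | none => rfl
      | some b => rfl

-- ===== VERDICT (by name: the statement is the Claim_ definition above) =====
theorem symbols_are_close_in_equation_py_spec : Claim_equal_symbols_are_close_in_equation_py := by
  intro s1 s2 _
  unfold Spec_symbols_are_close_in_equation_py symbols_are_close_in_equation_py symbols_are_close_in_equation_py_alt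
  exact pvLoopB_eq_outerA s2 s1
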